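-- pv_equiv track=rewrite | github.com/alonborn/BotGammon | backgammon/SW/AuxFunctions.py | get_points_until_distance
-- ===== SOURCE A (Python) =====
-- def get_points_until_distance(points, max_dist, start_from_highest=True):
--     # Sort points based on y position, either in ascending or descending order
--     sorted_points = sorted(points, key=lambda x: x[0][1], reverse=start_from_highest)
--
--     # Initialize the result list
--     result = []
--
--     # Iterate through sorted points
--     for i in range(len(sorted_points)):
--         current_point, _ = sorted_points[i]
--
--         # Determine the next_point or set a large positive/negative value if at the last point
--         next_point = sorted_points[i + 1][0] if i < len(sorted_points) - 1 else (10000, 10000) if start_from_highest else (-10000, -10000)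
--
--         # Calculate distance between current and next points
--         distance = abs(int(next_point[1]) - int(current_point[1]))
--
--         # Check if the distance is less than or equal to max_dist
--         if distance <= max_dist:
--             result.append(sorted_points[i])
--         else:
--             # Stop iteration if the distance is more than max_dist
--             result.append(sorted_points[i])
--             break
--
--     return result
-- ===== SOURCE B (Python) =====
-- def get_points_until_distance(points, max_dist, start_from_highest=True):
--     sp = sorted(points, key=lambda p: p[0][1], reverse=start_from_highest)
--     # Group the sorted points into clusters: a new cluster starts whenever the
--     # y-gap to the previous point exceeds max_dist; the answer is the first cluster.
--     clusters = []
--     for p in sp: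
--         if clusters and abs(int(p[0][1]) - int(clusters[-1][-1][0][1])) <= max_dist:
--             clusters[-1].append(p)
--         else:
--             clusters.append([p])
--     return clusters[0] if clusters else []
-- ===== Notes on version B (the rewrite author's own statement) =====
-- stated objective: alternative
-- what changed: Instead of A's index loop with a sentinel next point and a break, B partitions the whole sorted list into gap-clusters (a list of groups grown in one fold, starting a new group whenever the y-gap to the previous point exceeds max_dist) and returns the first cluster.
import Mathlib
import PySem

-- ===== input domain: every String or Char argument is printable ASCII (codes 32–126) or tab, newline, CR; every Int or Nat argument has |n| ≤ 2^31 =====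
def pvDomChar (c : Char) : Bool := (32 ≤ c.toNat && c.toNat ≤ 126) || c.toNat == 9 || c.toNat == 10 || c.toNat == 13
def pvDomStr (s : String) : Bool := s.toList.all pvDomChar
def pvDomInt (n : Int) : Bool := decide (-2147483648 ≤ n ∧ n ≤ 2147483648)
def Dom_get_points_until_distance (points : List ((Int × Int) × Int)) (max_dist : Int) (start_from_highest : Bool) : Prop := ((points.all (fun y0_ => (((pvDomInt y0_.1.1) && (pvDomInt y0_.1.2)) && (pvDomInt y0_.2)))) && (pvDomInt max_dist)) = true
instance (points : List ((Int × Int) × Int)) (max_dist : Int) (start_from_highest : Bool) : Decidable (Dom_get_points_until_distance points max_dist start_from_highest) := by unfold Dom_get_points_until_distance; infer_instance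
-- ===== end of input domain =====

-- B groups the sorted points into gap-clusters in one fold (list of groups, no break,
-- no cut index, no sentinel next point) and returns the first cluster (objective: alternative).

-- ===== PORT A =====
-- A's for-loop over range(len(sorted_points)) with break, as index recursion
-- (fuel = number of remaining indices; called with fuel = length, so it never runs out).
def get_points_until_distance_loop (sp : List ((Int × Int) × Int)) (max_dist : Int)
    (start_from_highest : Bool) : Nat → Nat → List ((Int × Int) × Int)
  | _, 0 => []
  | i, fuel+1 =>
    if i < sp.length then
      let current_point := (sp.getD i default).1
      let next_point :=
        if i < sp.length - 1 then (sp.getD (i+1) default).1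
        else if start_from_highest then ((10000 : Int), (10000 : Int)) else ((-10000 : Int), (-10000 : Int))
      let distance : Int := (next_point.2 - current_point.2).natAbs
      if distance ≤ max_dist then
        sp.getD i default :: get_points_until_distance_loop sp max_dist start_from_highest (i+1) fuel
      else [sp.getD i default]
    else []

def get_points_until_distance (points : List ((Int × Int) × Int)) (max_dist : Int) (start_from_highest : Bool) : List ((Int × Int) × Int) :=
  let sorted_points := PySem.List.sorted points (fun x => x.1.2) start_from_highest
  get_points_until_distance_loop sorted_points max_dist start_from_highest 0 sorted_points.length

-- ===== PORT B =====
-- one step of Source B's clustering loop: grow the last cluster, or start a new one.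
-- (the inner 'none' branch is Python's vacuous case: clusters built by the loop
-- never contain an empty cluster, so clusters[-1][-1] always exists)
def get_points_until_distance_step (md : Int) (clusters : List (List ((Int × Int) × Int)))
    (p : (Int × Int) × Int) : List (List ((Int × Int) × Int)) :=
  match clusters.getLast? with
  | none => clusters ++ [[p]]
  | some last =>
    match last.getLast? with
    | none => clusters ++ [[p]]
    | some q =>
      if ((p.1.2 - q.1.2).natAbs : Int) ≤ md then clusters.dropLast ++ [last ++ [p]]
      else clusters ++ [[p]]

def get_points_until_distance_alt (points : List ((Int × Int) × Int)) (max_dist : Int) (start_from_highest : Bool) : List ((Int × Int) × Int) :=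
  let sp := PySem.List.sorted points (fun x => x.1.2) start_from_highest
  let clusters := sp.foldl (get_points_until_distance_step max_dist) []
  match clusters with
  | [] => []
  | c :: _ => c

-- ===== PRECONDITION & SPEC =====
def Spec_get_points_until_distance (points : List ((Int × Int) × Int)) (max_dist : Int) (start_from_highest : Bool) (out : List ((Int × Int) × Int)) : Prop := out = get_points_until_distance_alt points max_dist start_from_highest
instance (points : List ((Int × Int) × Int)) (max_dist : Int) (start_from_highest : Bool) (out : List ((Int × Int) × Int)) : Decidable (Spec_get_points_until_distance points max_dist start_from_highest out) := by unfold Spec_get_points_until_distance; infer_instance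

-- ===== CLAIM =====
def Claim_equal_get_points_until_distance : Prop := ∀ (points : List ((Int × Int) × Int)) (max_dist : Int) (start_from_highest : Bool), Dom_get_points_until_distance points max_dist start_from_highest → Spec_get_points_until_distance points max_dist start_from_highest (get_points_until_distance points max_dist start_from_highest)

-- ===== LEMMAS AND PROOFS =====

-- proof-side mediator: how many leading elements of xs chain to the previous point q
def pvCutFrom (md : Int) (q : (Int × Int) × Int) : List ((Int × Int) × Int) → Nat
  | [] => 0
  | p :: xs => if ((p.1.2 - q.1.2).natAbs : Int) ≤ md then 1 + pvCutFrom md p xs else 0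

-- A's loop from index i returns sp[i] plus the chained prefix of the suffix after i.
theorem loop_eq_take_cutFrom (sp : List ((Int × Int) × Int)) (max_dist : Int)
    (sfh : Bool) : ∀ (fuel i : Nat), sp.length ≤ i + fuel → (h : i < sp.length) →
    get_points_until_distance_loop sp max_dist sfh i fuel
      = sp[i] :: (sp.drop (i+1)).take (pvCutFrom max_dist sp[i] (sp.drop (i+1))) := by
  intro fuel
  induction fuel with
  | zero => intro i hf h; omega
  | succ fuel ih =>
    intro i hf h
    rw [get_points_until_distance_loop, if_pos h]
    have hgi : sp.getD i default = sp[i] := List.getD_eq_getElem sp default h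
    by_cases h2 : i < sp.length - 1
    · have hi1 : i + 1 < sp.length := by omega
      have hdrop : sp.drop (i+1) = sp[i+1] :: sp.drop (i+2) := List.drop_eq_getElem_cons hi1
      have hgi1 : sp.getD (i+1) default = sp[i+1] := List.getD_eq_getElem sp default hi1
      rw [if_pos h2]
      simp only [hgi, hgi1, hdrop, pvCutFrom]
      by_cases hd : (((sp[i+1]).1.2 - (sp[i]).1.2).natAbs : Int) ≤ max_dist
      · rw [if_pos hd, if_pos hd, ih (i+1) (by omega) hi1]
        rw [Nat.add_comm 1 _, List.take_succ_cons]
      · rw [if_neg hd, if_neg hd]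
        simp
    · have hlast : sp.drop (i+1) = [] := List.drop_eq_nil_of_le (by omega)
      rw [if_neg h2, hlast]
      have hloop : get_points_until_distance_loop sp max_dist sfh (i+1) fuel = [] := by
        cases fuel with
        | zero => rfl
        | succ f => rw [get_points_until_distance_loop, if_neg (by omega)]
      simp only [hgi, pvCutFrom, List.take_nil]
      split <;> simp [hloop]

-- once there are at least two clusters (all nonempty-last-shaped), the head never changes
theorem foldl_step_head_stable (md : Int) :
    ∀ (xs : List ((Int × Int) × Int)) (c : List ((Int × Int) × Int))
      (C : List (List ((Int × Int) × Int))) (L : List ((Int × Int) × Int)) (q : (Int × Int) × Int),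
    List.foldl (get_points_until_distance_step md) ((c :: C) ++ [L ++ [q]]) xs
      = c :: (List.foldl (get_points_until_distance_step md) ((c :: C) ++ [L ++ [q]]) xs).tail := by
  intro xs
  induction xs with
  | nil => intro c C L q; simp
  | cons p xs ih =>
    intro c C L q
    have hstep : get_points_until_distance_step md ((c :: C) ++ [L ++ [q]]) p
        = if ((p.1.2 - q.1.2).natAbs : Int) ≤ md
          then (c :: C) ++ [(L ++ [q]) ++ [p]]
          else (c :: (C ++ [L ++ [q]])) ++ [([] : List ((Int × Int) × Int)) ++ [p]] := by
      simp only [get_points_until_distance_step, List.cons_append]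
      have hre : c :: (C ++ [L ++ [q]]) = (c :: C) ++ [L ++ [q]] := rfl
      rw [hre]
      simp only [List.getLast?_concat, List.dropLast_concat]
      split <;> simp
    rw [List.foldl_cons, hstep]
    split
    · exact ih c C (L ++ [q]) p
    · exact ih c (C ++ [L ++ [q]]) [] p

-- folding from a single cluster ending in q grows that cluster by exactly the chained prefix
theorem foldl_step_single (md : Int) :
    ∀ (xs : List ((Int × Int) × Int)) (L : List ((Int × Int) × Int)) (q : (Int × Int) × Int),
    (List.foldl (get_points_until_distance_step md) [L ++ [q]] xs).head?
      = some (L ++ [q] ++ xs.take (pvCutFrom md q xs)) := by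
  intro xs
  induction xs with
  | nil => intro L q; simp [pvCutFrom]
  | cons p xs ih =>
    intro L q
    have hstep : get_points_until_distance_step md [L ++ [q]] p
        = if ((p.1.2 - q.1.2).natAbs : Int) ≤ md
          then [(L ++ [q]) ++ [p]]
          else (L ++ [q]) :: [([] : List ((Int × Int) × Int)) ++ [p]] := by
      unfold get_points_until_distance_step
      simp
    rw [List.foldl_cons, hstep, pvCutFrom]
    by_cases hd : ((p.1.2 - q.1.2).natAbs : Int) ≤ md
    · rw [if_pos hd, if_pos hd, ih (L ++ [q]) p, Nat.add_comm 1 _, List.take_succ_cons]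
      simp
    · rw [if_neg hd, if_neg hd]
      have := foldl_step_head_stable md xs (L ++ [q]) [] [] p
      simp only [List.nil_append, List.singleton_append] at this ⊢
      rw [this]
      simp

-- ===== VERDICT =====
theorem get_points_until_distance_spec : Claim_equal_get_points_until_distance := by
  intro points max_dist sfh _
  unfold Spec_get_points_until_distance get_points_until_distance get_points_until_distance_alt
  cases hsp : PySem.List.sorted points (fun x => x.1.2) sfh with
  | nil => simp [get_points_until_distance_loop]
  | cons a t =>
    have hA := loop_eq_take_cutFrom (a :: t) max_dist sfh (a :: t).length 0 (by simp) (by simp)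
    simp only [List.getElem_cons_zero, List.drop_succ_cons, List.drop_zero] at hA
    have hstep0 : get_points_until_distance_step max_dist [] a = [[a]] := by
      unfold get_points_until_distance_step; simp
    have hB := foldl_step_single max_dist t [] a
    simp only [List.nil_append] at hB
    simp only [hA, List.foldl_cons, hstep0]
    cases hfold : List.foldl (get_points_until_distance_step max_dist) [[a]] t with
    | nil => rw [hfold] at hB; simp at hB
    | cons c rest =>
      rw [hfold] at hB
      simp only [List.head?_cons, Option.some.injEq] at hB
      simp [hB]
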